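-- pv_equiv track=rewrite | github.com/Seiya-Umemoto/Algorithm | matrixRoot.py | getHighestRoot
-- ===== SOURCE A (Python) =====
-- def getHighestRoot(S, i, j, h_path):
--     h_path.append(S[i][j])
--     if i == 0 and j == 0:
--         return h_path
--     if 1 <= i < len(S) and 1 <= j < len(S[i]):
--         if S[i][j - 1] > S[i - 1][j]:
--             return getHighestRoot(S, i, j-1, h_path)
--         else:
--             return getHighestRoot(S, i - 1, j, h_path)
--     elif i == 0:
--         return getHighestRoot(S, i, j - 1, h_path)
--     elif j == 0:
--         return getHighestRoot(S, i - 1, j, h_path)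
-- ===== SOURCE B (Python) =====
-- def getHighestRoot(S, i, j, h_path):
--     while not (i == 0 and j == 0):
--         h_path.append(S[i][j])
--         if i != 0 and j != 0:
--             if S[i][j - 1] > S[i - 1][j]:
--                 j -= 1
--             else:
--                 i -= 1
--         elif j != 0:
--             j -= 1
--         else:
--             i -= 1
--     h_path.append(S[0][0])
--     return h_path
-- ===== Notes on version B (the rewrite author's own statement) =====
-- stated objective: simpler
-- what changed: Replaces the four-way recursive descent with an iterative while-loop over (i, j) whose guard is the termination test, with simplified branch conditions (i != 0 / j != 0 instead of the 1 <= i < len(S) range checks, which are redundant on valid inputs) and the final origin cell appended after the loop.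
-- outside the precondition, e.g. on getHighestRoot([[], [0]], -1, -1, [0, 1]): A returns None, B raises IndexError; on getHighestRoot([[1], [2, 2], [3, 3]], 2, 1, []): A returns [3, 3, 2, 1], B returns [3, 3, 2, 1]
import Mathlib
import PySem

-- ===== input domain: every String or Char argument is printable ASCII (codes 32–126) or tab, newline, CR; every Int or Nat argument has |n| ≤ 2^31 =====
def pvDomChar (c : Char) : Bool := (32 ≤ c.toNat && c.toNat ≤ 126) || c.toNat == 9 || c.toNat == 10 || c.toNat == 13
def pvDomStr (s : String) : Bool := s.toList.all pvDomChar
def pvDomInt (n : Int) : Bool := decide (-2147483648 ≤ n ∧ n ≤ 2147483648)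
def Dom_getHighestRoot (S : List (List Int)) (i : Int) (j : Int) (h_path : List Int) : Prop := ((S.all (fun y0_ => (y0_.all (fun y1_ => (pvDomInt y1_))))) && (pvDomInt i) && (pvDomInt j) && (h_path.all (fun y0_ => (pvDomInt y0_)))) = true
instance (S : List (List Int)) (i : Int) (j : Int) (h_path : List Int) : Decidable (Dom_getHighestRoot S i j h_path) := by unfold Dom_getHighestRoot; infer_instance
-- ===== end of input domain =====

-- B replaces the recursive descent by an iterative loop over (i, j) with simplified
-- branch guards (objective: simpler). Both Pythons append to h_path in place; the
-- equivalence proved here is about the return value (the mutation is identical anyway).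


-- ===== PORT A =====
-- Fuel makes the Python recursion total; inside Pre_ the recursion takes exactly
-- i+j calls, so fuel (i+j).toNat+1 never runs out there. The `none`/fuel-0 cases
-- ([] results) correspond to inputs where Python raises IndexError or returns None,
-- all excluded by Pre_.
def getHighestRootFuel : Nat → List (List Int) → Int → Int → List Int → List Int
  | 0, _, _, _, _ => []
  | fuel+1, S, i, j, h_path =>
    match PySem.List.pyGet? S i with
    | none => []
    | some row =>
      match PySem.List.pyGet? row j with
      | none => []
      | some v =>
        let h := h_path ++ [v]
        if i = 0 ∧ j = 0 then h
        else if (1 ≤ i ∧ i < (S.length : Int)) ∧ (1 ≤ j ∧ j < (row.length : Int)) then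
          match PySem.List.pyGet? row (j-1), (PySem.List.pyGet? S (i-1)).bind (fun r => PySem.List.pyGet? r j) with
          | some l, some u =>
            if l > u then getHighestRootFuel fuel S i (j-1) h
            else getHighestRootFuel fuel S (i-1) j h
          | _, _ => []
        else if i = 0 then getHighestRootFuel fuel S i (j-1) h
        else if j = 0 then getHighestRootFuel fuel S (i-1) j h
        else []

def getHighestRoot (S : List (List Int)) (i : Int) (j : Int) (h_path : List Int) : List Int :=
  getHighestRootFuel ((i+j).toNat + 1) S i j h_path

-- ===== PORT B =====
-- The while-loop of Source B: the guard is `not (i == 0 and j == 0)`; the body appends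
-- S[i][j] and moves one step; after the loop S[0][0] is appended.
def altLoop : Nat → List (List Int) → Int → Int → List Int → List Int
  | 0, _, _, _, h => h
  | fuel+1, S, i, j, h =>
    if i = 0 ∧ j = 0 then h
    else
      match (PySem.List.pyGet? S i).bind (fun r => PySem.List.pyGet? r j) with
      | none => h
      | some v =>
        let h := h ++ [v]
        if i ≠ 0 ∧ j ≠ 0 then
          match (PySem.List.pyGet? S i).bind (fun r => PySem.List.pyGet? r (j-1)),
                (PySem.List.pyGet? S (i-1)).bind (fun r => PySem.List.pyGet? r j) with
          | some l, some u =>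
            if l > u then altLoop fuel S i (j-1) h
            else altLoop fuel S (i-1) j h
          | _, _ => h
        else if j ≠ 0 then altLoop fuel S i (j-1) h
        else altLoop fuel S (i-1) j h

def getHighestRoot_alt (S : List (List Int)) (i : Int) (j : Int) (h_path : List Int) : List Int :=
  altLoop ((i+j).toNat + 1) S i j h_path
    ++ [((PySem.List.pyGet? S 0).bind (fun r => PySem.List.pyGet? r 0)).getD 0]

-- ===== PRECONDITION & SPEC =====
-- Pre_ excludes negative or out-of-range start indices and ragged matrices where some
-- row 0..i is shorter than j+1: on such inputs A raises IndexError, returns None, or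
-- (when the greedy path happens to avoid the short row) returns a value B also returns.
def Pre_getHighestRoot (S : List (List Int)) (i : Int) (j : Int) (h_path : List Int) : Prop :=
  0 ≤ i ∧ i < (S.length : Int) ∧ 0 ≤ j ∧ ∀ row ∈ S.take (i.toNat + 1), j < (row.length : Int)
instance (S : List (List Int)) (i : Int) (j : Int) (h_path : List Int) : Decidable (Pre_getHighestRoot S i j h_path) := by unfold Pre_getHighestRoot; infer_instance

def pvWitness_getHighestRoot : List (List Int) × Int × Int × List Int := ([[1,2],[3,4]], 1, 1, [])

def Spec_getHighestRoot (S : List (List Int)) (i : Int) (j : Int) (h_path : List Int) (out : List Int) : Prop := out = getHighestRoot_alt S i j h_path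
instance (S : List (List Int)) (i : Int) (j : Int) (h_path : List Int) (out : List Int) : Decidable (Spec_getHighestRoot S i j h_path out) := by unfold Spec_getHighestRoot; infer_instance

-- ===== CLAIM (what is proved, stated in full; the proofs are below) =====
def Claim_equal_getHighestRoot : Prop := ∀ (S : List (List Int)) (i : Int) (j : Int) (h_path : List Int), Dom_getHighestRoot S i j h_path → Pre_getHighestRoot S i j h_path → Spec_getHighestRoot S i j h_path (getHighestRoot S i j h_path)

-- ===== LEMMAS AND PROOFS =====

lemma mem_take_of_lt {α : Type} (l : List α) (k n : Nat) (hk : k < l.length) (hkn : k < n) :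
    l[k] ∈ l.take n := by
  have h1 : k < (l.take n).length := by simp; omega
  have h2 : (l.take n)[k] = l[k] := List.getElem_take
  exact h2 ▸ (l.take n).getElem_mem h1

lemma main_lemma (fuel : Nat) : ∀ (S : List (List Int)) (i j : Int) (h : List Int),
    0 ≤ i → i < (S.length : Int) → 0 ≤ j →
    (∀ row ∈ S.take (i.toNat + 1), j < (row.length : Int)) →
    (i + j).toNat < fuel →
    getHighestRootFuel fuel S i j h =
      altLoop fuel S i j h
        ++ [((PySem.List.pyGet? S 0).bind (fun r => PySem.List.pyGet? r 0)).getD 0] := by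
  induction fuel with
  | zero => intro S i j h _ _ _ _ hf; omega
  | succ f ih =>
    intro S i j h hi0 hiS hj0 hrows hf
    have hiN : i.toNat < S.length := by omega
    have hrow_mem : S[i.toNat] ∈ S.take (i.toNat + 1) := mem_take_of_lt S i.toNat _ hiN (by omega)
    have hjrow : j < (S[i.toNat].length : Int) := hrows _ hrow_mem
    have hSi : PySem.List.pyGet? S i = some S[i.toNat] :=
      PySem.List.pyGet?_eq_some_getElem S hi0 hiS
    have hjN : j.toNat < S[i.toNat].length := by omega
    have hSij : PySem.List.pyGet? S[i.toNat] j = some S[i.toNat][j.toNat] :=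
      PySem.List.pyGet?_eq_some_getElem S[i.toNat] hj0 hjrow
    -- row-0 facts (for the final append)
    have h0S : (0:Int) < S.length := by omega
    have h0mem : S[0] ∈ S.take (i.toNat + 1) := mem_take_of_lt S 0 _ (by omega) (by omega)
    have h0row : (0:Int) < (S[0].length : Int) := by have := hrows _ h0mem; omega
    have hS0 : PySem.List.pyGet? S 0 = some S[0] :=
      PySem.List.pyGet?_eq_some_getElem S (by omega) h0S
    have hS00 : PySem.List.pyGet? S[0] 0 = some S[0][0] :=
      PySem.List.pyGet?_eq_some_getElem S[0] (by omega) h0row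
    by_cases hz : i = 0 ∧ j = 0
    · -- both at origin
      obtain ⟨hz1, hz2⟩ := hz
      subst hz1; subst hz2
      simp [getHighestRootFuel, altLoop, hSi, hS00]
    · -- take one step; cases on which branch
      by_cases hij : 1 ≤ i ∧ 1 ≤ j
      · -- interior cell
        obtain ⟨hi1, hj1⟩ := hij
        have hcond : (1 ≤ i ∧ i < (S.length : Int)) ∧ (1 ≤ j ∧ j < (S[i.toNat].length : Int)) :=
          ⟨⟨hi1, hiS⟩, ⟨hj1, hjrow⟩⟩
        have hl : PySem.List.pyGet? S[i.toNat] (j-1) = some S[i.toNat][(j-1).toNat] :=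
          PySem.List.pyGet?_eq_some_getElem _ (by omega) (by omega)
        have hi1N : (i-1).toNat < S.length := by omega
        have hSi1 : PySem.List.pyGet? S (i-1) = some S[(i-1).toNat] :=
          PySem.List.pyGet?_eq_some_getElem _ (by omega) (by omega)
        have hmem1 : S[(i-1).toNat] ∈ S.take (i.toNat + 1) :=
          mem_take_of_lt S (i-1).toNat _ hi1N (by omega)
        have hjrow1 : j < (S[(i-1).toNat].length : Int) := hrows _ hmem1
        have hu : PySem.List.pyGet? S[(i-1).toNat] j = some S[(i-1).toNat][j.toNat] :=
          PySem.List.pyGet?_eq_some_getElem S[(i-1).toNat] hj0 hjrow1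
        have pre_left : ∀ row ∈ S.take (i.toNat + 1), j - 1 < (row.length : Int) := by
          intro r hr; have := hrows r hr; omega
        have pre_up : ∀ row ∈ S.take ((i-1).toNat + 1), j < (row.length : Int) := by
          intro r hr
          apply hrows
          have hle : (i-1).toNat + 1 ≤ i.toNat + 1 := by omega
          have : S.take ((i-1).toNat + 1) = (S.take (i.toNat + 1)).take ((i-1).toNat + 1) := by
            rw [List.take_take]; congr 1; omega
          rw [this] at hr
          exact List.mem_of_mem_take hr
        have ihl := ih S i (j-1) (h ++ [S[i.toNat][j.toNat]]) hi0 hiS (by omega) pre_left (by omega)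
        have ihu := ih S (i-1) j (h ++ [S[i.toNat][j.toNat]]) (by omega) (by omega) hj0 pre_up (by omega)
        simp only [getHighestRootFuel, altLoop, hSi, hSij, Option.bind_some, hl, hSi1, hu,
          if_neg hz, hcond, if_pos, and_true]
        have hne : i ≠ 0 ∧ j ≠ 0 := ⟨by omega, by omega⟩
        rw [if_pos hne]
        split_ifs with hcmp
        · exact ihl
        · exact ihu
      · -- edge cell: i = 0 or j = 0 (not both)
        have hcond : ¬ ((1 ≤ i ∧ i < (S.length : Int)) ∧ (1 ≤ j ∧ j < (S[i.toNat].length : Int))) := by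
          intro ⟨⟨a,_⟩,⟨b,_⟩⟩; exact hij ⟨a, b⟩
        have hne : ¬ (i ≠ 0 ∧ j ≠ 0) := by
          intro ⟨a, b⟩; exact hij ⟨by omega, by omega⟩
        by_cases hi : i = 0
        · -- move left
          have hjne : j ≠ 0 := by intro hh; exact hz ⟨hi, hh⟩
          have pre_left : ∀ row ∈ S.take (i.toNat + 1), j - 1 < (row.length : Int) := by
            intro r hr; have := hrows r hr; omega
          have ihl := ih S i (j-1) (h ++ [S[i.toNat][j.toNat]]) hi0 hiS (by omega) pre_left (by omega)
          simp only [getHighestRootFuel, altLoop, hSi, hSij, Option.bind_some,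
            if_neg hz, if_neg hcond, if_neg hne, if_pos hi, if_pos hjne]
          exact ihl
        · -- move up: j = 0
          have hj : j = 0 := by
            by_contra hjn
            exact hij ⟨by omega, by omega⟩
          have pre_up : ∀ row ∈ S.take ((i-1).toNat + 1), j < (row.length : Int) := by
            intro r hr
            apply hrows
            have : S.take ((i-1).toNat + 1) = (S.take (i.toNat + 1)).take ((i-1).toNat + 1) := by
              rw [List.take_take]; congr 1; omega
            rw [this] at hr
            exact List.mem_of_mem_take hr
          have ihu := ih S (i-1) j (h ++ [S[i.toNat][j.toNat]]) (by omega) (by omega) hj0 pre_up (by omega)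
          simp only [getHighestRootFuel, altLoop, hSi, hSij, Option.bind_some,
            if_neg hz, if_neg hcond, if_neg hne, if_neg hi,
            if_pos hj, if_neg (show ¬ j ≠ 0 from fun k => k hj)]
          exact ihu

-- ===== VERDICT (by name: the statement is the Claim_ definition above) =====
theorem getHighestRoot_spec : Claim_equal_getHighestRoot := by
  intro S i j h_path _ hpre
  obtain ⟨hi0, hiS, hj0, hrows⟩ := hpre
  unfold Spec_getHighestRoot getHighestRoot getHighestRoot_alt
  exact main_lemma ((i+j).toNat + 1) S i j h_path hi0 hiS hj0 hrows (by omega)
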